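-- pv_equiv track=rewrite | github.com/GAURAVSVNIT/Genesis | apps/backend/intelligence/trend_analyzer.py | _suggest_tone
-- ===== SOURCE A (Python) =====
-- from typing import Dict, List, Optional, Tuple
--
-- def _suggest_tone(topics: List[Dict]) -> str:
--     """Suggest content tone based on trends."""
--     sources = [t.get("source", "") for t in topics]
--
--     if "news" in sources:
--         return "professional and informative"
--     elif "reddit" in sources or "twitter" in sources:
--         return "conversational and engaging"
--     else:
--         return "balanced and authoritative"
-- ===== SOURCE B (Python) =====
-- from typing import Dict, List, Optional, Tuple
--
-- _PRIORITY = {"news": 2, "reddit": 1, "twitter": 1}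
-- _TONES = [
--     "balanced and authoritative",
--     "conversational and engaging",
--     "professional and informative",
-- ]
--
-- def _suggest_tone(topics: List[Dict]) -> str:
--     """Suggest content tone based on trends."""
--     best = 0
--     for t in topics:
--         best = max(best, _PRIORITY.get(t.get("source", ""), 0))
--     return _TONES[best]
-- ===== Notes on version B (the rewrite author's own statement) =====
-- stated objective: alternative
-- what changed: Replaces the intermediate sources list and three membership tests with a priority table: each topic's source is scored (news=2, reddit/twitter=1, other=0), the maximum score is accumulated in one pass, and the tone is looked up in a table indexed by that score.
import Mathlib
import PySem

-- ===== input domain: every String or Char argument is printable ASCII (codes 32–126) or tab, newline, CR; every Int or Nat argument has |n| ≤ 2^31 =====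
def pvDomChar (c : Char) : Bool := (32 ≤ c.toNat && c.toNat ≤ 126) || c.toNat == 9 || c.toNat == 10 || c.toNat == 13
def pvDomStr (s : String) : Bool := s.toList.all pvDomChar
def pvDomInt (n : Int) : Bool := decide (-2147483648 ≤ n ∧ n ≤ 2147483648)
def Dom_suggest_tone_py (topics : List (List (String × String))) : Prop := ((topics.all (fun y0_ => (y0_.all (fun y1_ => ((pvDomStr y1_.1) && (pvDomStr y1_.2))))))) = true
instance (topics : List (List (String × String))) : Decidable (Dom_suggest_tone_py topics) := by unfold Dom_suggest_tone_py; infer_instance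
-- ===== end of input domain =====

-- B scores each source through a priority table (news=2, reddit/twitter=1, other=0), keeps
-- the running maximum, and indexes a tone table by that score; objective: alternative.

-- ===== PORT A =====
def suggest_tone_py (topics : List (List (String × String))) : String :=
  let sources := topics.map (fun t => (PySem.Dict.mk t).getD "source" "")
  if sources.contains "news" then "professional and informative"
  else if sources.contains "reddit" || sources.contains "twitter" then
    "conversational and engaging"
  else "balanced and authoritative"

-- ===== PORT B =====
def pvPriority : PySem.Dict String Int :=
  PySem.Dict.mk [("news", 2), ("reddit", 1), ("twitter", 1)]

def pvTones : List String :=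
  ["balanced and authoritative", "conversational and engaging", "professional and informative"]

def suggest_tone_py_alt (topics : List (List (String × String))) : String :=
  let best := topics.foldl
    (fun (best : Int) t => max best (pvPriority.getD ((PySem.Dict.mk t).getD "source" "") 0)) 0
  (PySem.List.pyGet? pvTones best).getD ""   -- _TONES[best]; best ∈ {0,1,2}, always in range

-- ===== PRECONDITION & SPEC =====
def Spec_suggest_tone_py (topics : List (List (String × String))) (out : String) : Prop := out = suggest_tone_py_alt topics
instance (topics : List (List (String × String))) (out : String) : Decidable (Spec_suggest_tone_py topics out) := by unfold Spec_suggest_tone_py; infer_instance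

-- ===== CLAIM (what is proved, stated in full; the proofs are below) =====
def Claim_equal_suggest_tone_py : Prop := ∀ (topics : List (List (String × String))), Dom_suggest_tone_py topics → Spec_suggest_tone_py topics (suggest_tone_py topics)

-- ===== LEMMAS AND PROOFS =====

-- the score of one source string
def pvScore (s : String) : Int := pvPriority.getD s 0

-- the score A's three membership tests correspond to
def pvListScore (topics : List (List (String × String))) : Int :=
  let sources := topics.map (fun t => (PySem.Dict.mk t).getD "source" "")
  if sources.contains "news" then 2
  else if sources.contains "reddit" || sources.contains "twitter" then 1
  else 0

theorem pvScore_eq (s : String) :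
    pvScore s = if s = "news" then 2 else if s = "reddit" ∨ s = "twitter" then 1 else 0 := by
  by_cases h1 : s = "news"
  · subst h1; decide
  · by_cases h2 : s = "reddit"
    · subst h2; decide
    · by_cases h3 : s = "twitter"
      · subst h3; decide
      · have hn : ("news" == s) = false := by simp; exact fun h => h1 h.symm
        have hr : ("reddit" == s) = false := by simp; exact fun h => h2 h.symm
        have ht : ("twitter" == s) = false := by simp; exact fun h => h3 h.symm
        simp [pvScore, pvPriority, PySem.Dict.getD, PySem.Dict.get?, List.find?, hn, hr, ht, h1, h2, h3]

theorem pvListScore_cons (t : List (String × String)) (ts : List (List (String × String))) :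
    pvListScore (t :: ts) = max (pvScore ((PySem.Dict.mk t).getD "source" "")) (pvListScore ts) := by
  rw [pvScore_eq]
  unfold pvListScore
  simp only [List.map_cons, List.contains_cons, Bool.or_eq_true, beq_iff_eq]
  by_cases h1 : (PySem.Dict.mk t).getD "source" "" = "news" <;>
  by_cases h2 : (PySem.Dict.mk t).getD "source" "" = "reddit" <;>
  by_cases h3 : (PySem.Dict.mk t).getD "source" "" = "twitter" <;>
  simp only [h1, h2, h3] <;>
  cases hc1 : (ts.map (fun t => (PySem.Dict.mk t).getD "source" "")).contains "news" <;>
  cases hc2 : (ts.map (fun t => (PySem.Dict.mk t).getD "source" "")).contains "reddit" <;>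
  cases hc3 : (ts.map (fun t => (PySem.Dict.mk t).getD "source" "")).contains "twitter" <;>
  simp_all [eq_comm] <;> omega

-- the fold in B computes the max of the (nonnegative) accumulator and the list score
theorem suggest_tone_fold (topics : List (List (String × String))) (b : Int) (hb : 0 ≤ b) :
    topics.foldl
      (fun (best : Int) t => max best (pvPriority.getD ((PySem.Dict.mk t).getD "source" "") 0)) b
    = max b (pvListScore topics) := by
  induction topics generalizing b with
  | nil =>
    simp only [List.foldl_nil, pvListScore, List.map_nil]
    simp
    omega
  | cons t ts ih =>
    rw [List.foldl_cons, ih _ (le_trans hb (le_max_left _ _)), pvListScore_cons, ← max_assoc]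
    rfl

-- ===== VERDICT (by name: the statement is the Claim_ definition above) =====
theorem suggest_tone_py_spec : Claim_equal_suggest_tone_py := by
  intro topics _
  unfold Spec_suggest_tone_py suggest_tone_py suggest_tone_py_alt
  rw [suggest_tone_fold _ _ le_rfl]
  simp only [pvListScore]
  split_ifs <;> rfl
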